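-- pv_equiv track=rewrite | github.com/Imran2205/swim_tracker | serial_read.py | ston
-- ===== SOURCE A (Python) =====
-- def ston(S):
--     sum = 0
--     if len(S)>=3:
--         for x in range(3,len(S)):
--             iv=S[x]
--
--             if iv>=48 and iv<=57:
--                 sum=(sum*10)+(iv-48)
--
--
--     return sum
-- ===== SOURCE B (Python) =====
-- def ston(S):
--     digs = bytes(c for c in S[3:] if 48 <= c <= 57)
--     return int(digs) if digs else 0
-- ===== Notes on version B (the rewrite author's own statement) =====
-- stated objective: simpler
-- what changed: Replaced the inline index loop with Horner accumulation by a collect-then-parse two-step: filter the digit bytes out of S[3:] once, then convert them with a single int() call (0 when no digits).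
import Mathlib
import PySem

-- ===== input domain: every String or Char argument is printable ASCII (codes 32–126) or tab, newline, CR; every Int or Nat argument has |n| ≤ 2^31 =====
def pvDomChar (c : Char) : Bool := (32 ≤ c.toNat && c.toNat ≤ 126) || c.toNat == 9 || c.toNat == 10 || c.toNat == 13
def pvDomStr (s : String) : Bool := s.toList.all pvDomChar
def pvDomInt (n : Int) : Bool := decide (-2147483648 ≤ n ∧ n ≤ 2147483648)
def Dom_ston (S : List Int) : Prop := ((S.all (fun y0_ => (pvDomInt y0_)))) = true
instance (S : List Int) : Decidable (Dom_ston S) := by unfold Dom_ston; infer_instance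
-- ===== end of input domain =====

-- B replaces A's inline digit-accumulating index loop by a collect-then-parse decomposition
-- (filter the digit bytes of S[3:], then one int() conversion, 0 when empty): simpler, same cost.


-- ===== PORT A =====
def ston (S : List Int) : Int :=
  if (S.length : Int) ≥ 3 then
    (PySem.List.pyRange 3 (S.length : Int) 1).foldl
      (fun sum x =>
        let iv := PySem.List.pyGetD S x 0
        if iv ≥ 48 ∧ iv ≤ 57 then sum * 10 + (iv - 48) else sum) 0
  else 0

-- ===== PORT B =====
-- int(digs) on a non-empty digit-only byte string is exactly the base-10 Horner fold
def ston_alt (S : List Int) : Int :=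
  let digs := (PySem.List.slice S (some 3) none).filter (fun c => 48 ≤ c ∧ c ≤ 57)
  if digs = [] then 0 else digs.foldl (fun a c => a * 10 + (c - 48)) 0

-- ===== PRECONDITION & SPEC =====
def Spec_ston (S : List Int) (out : Int) : Prop := out = ston_alt S
instance (S : List Int) (out : Int) : Decidable (Spec_ston S out) := by unfold Spec_ston; infer_instance

-- ===== CLAIM (what is proved, stated in full; the proofs are below) =====
def Claim_equal_ston : Prop := ∀ (S : List Int), Dom_ston S → Spec_ston S (ston S)

-- ===== LEMMAS AND PROOFS =====

-- A's skip-or-accumulate fold over xs equals B's filter-then-Horner fold (List.foldl_filter).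
lemma ston_fold_filter (xs : List Int) :
    xs.foldl (fun s iv => if iv ≥ 48 ∧ iv ≤ 57 then s * 10 + (iv - 48) else s) 0
    = (if xs.filter (fun c => 48 ≤ c ∧ c ≤ 57) = [] then 0
       else (xs.filter (fun c => 48 ≤ c ∧ c ≤ 57)).foldl (fun a c => a * 10 + (c - 48)) 0) := by
  have hf : (xs.filter (fun c => 48 ≤ c ∧ c ≤ 57)).foldl (fun a c => a * 10 + (c - 48)) 0
      = xs.foldl (fun s iv => if iv ≥ 48 ∧ iv ≤ 57 then s * 10 + (iv - 48) else s) 0 := by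
    rw [List.foldl_filter]
    simp only [ge_iff_le, decide_eq_true_eq]
  rw [hf]
  split
  · next he => rw [← hf, he]; rfl
  · rfl

-- ===== VERDICT (by name: the statement is the Claim_ definition above) =====
theorem ston_spec : Claim_equal_ston := by
  intro S _
  unfold Spec_ston ston ston_alt
  have hs : PySem.List.slice S (some 3) none = S.drop 3 := by
    simp [PySem.List.slice_from]
  rw [hs]
  by_cases h : (S.length : Int) ≥ 3
  · rw [if_pos h, PySem.List.foldl_pyRange_pyGetD' S 0 (fun sum iv => if iv ≥ 48 ∧ iv ≤ 57 then sum * 10 + (iv - 48) else sum) 0 (by norm_num : (0:Int) ≤ 3)]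
    exact ston_fold_filter (S.drop 3)
  · rw [if_neg h]
    have hd : S.drop 3 = [] := List.drop_eq_nil_of_le (by omega)
    rw [hd]
    rfl
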